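-- pv_equiv track=rewrite | github.com/roelschlaeger/usexmltodict | python_projects/chkio/weak_point/checkio.py | weak_point
-- ===== SOURCE A (Python) =====
-- def transpose(l):
--     """Interchange the rows and columns of l."""
--     rows = len(l)
--     cols = len(l[0])
--     result = []
--     for c in range(cols):
--         col = []
--         for r in range(rows):
--             col.append(l[r][c])
--         result.append(col)
--     return result
--
-- def weak_point(l):
--     row_sums = [sum(x) for x in l]
--     col_sums = [sum(y) for y in transpose(l)]
--     rmin = min(row_sums)
--     for r, rval in enumerate(row_sums):
--         if rval == rmin:
--             break
--     cmin = min(col_sums)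
--     for c, cval in enumerate(col_sums):
--         if cval == cmin:
--             break
--     return [r, c]
-- ===== SOURCE B (Python) =====
-- def weak_point(l):
--     cols = len(l[0])
--     r, rbest = 0, sum(l[0])
--     i = 1
--     for row in l[1:]:
--         s = sum(row)
--         if s < rbest:
--             r, rbest = i, s
--         i += 1
--
--     def colsum(j):
--         s = 0
--         for row in l:
--             s += row[j]
--         return s
--
--     c, cbest = 0, colsum(0)
--     for j in range(1, cols):
--         s = colsum(j)
--         if s < cbest:
--             c, cbest = j, s
--     return [r, c]
-- ===== Notes on version B (the rewrite author's own statement) =====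
-- stated objective: alternative
-- what changed: B never materialises row-sum/column-sum lists or a transposed matrix: it keeps a single running (best value, best index) pair, scanning row sums in one pass and then scanning columns directly (summing column j in place) with no min()/index()/enumerate stage; strict '<' in the online scan preserves A's first-minimum tie-breaking, and dropping the transpose copy and extra list passes gives a constant-factor speedup.
import Mathlib
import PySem

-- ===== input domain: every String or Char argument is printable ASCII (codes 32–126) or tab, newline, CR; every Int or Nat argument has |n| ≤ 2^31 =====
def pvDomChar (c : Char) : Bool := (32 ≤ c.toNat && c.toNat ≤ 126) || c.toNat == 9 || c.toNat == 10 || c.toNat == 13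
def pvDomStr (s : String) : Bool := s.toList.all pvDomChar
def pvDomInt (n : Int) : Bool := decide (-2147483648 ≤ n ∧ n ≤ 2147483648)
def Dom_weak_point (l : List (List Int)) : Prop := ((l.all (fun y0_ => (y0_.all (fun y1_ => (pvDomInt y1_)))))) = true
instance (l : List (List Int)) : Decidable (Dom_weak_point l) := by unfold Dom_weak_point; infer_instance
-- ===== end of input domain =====

-- B replaces A's sum-lists + transpose + min/linear-search pipeline by two online
-- argmin scans that keep only a scalar best value and index (objective: alternative).

-- ===== PORT A =====
-- transpose(l); an out-of-range access is none (Python's IndexError) — excluded by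
-- Pre_, so the .getD defaults are never reached on admitted inputs.
def pvTransposeA (l : List (List Int)) : List (List Int) :=
  let rows : Int := l.length
  let cols : Int := ((PySem.List.pyGet? l 0).getD []).length
  (PySem.List.pyRange 0 cols 1).map (fun c =>
    (PySem.List.pyRange 0 rows 1).map (fun r =>
      (PySem.List.pyGet? ((PySem.List.pyGet? l r).getD []) c).getD 0))

-- A's 'for i, v in enumerate(xs): if v == m: break'; with no break the loop
-- variable is left at the last index (len-1), matching Python's leftover variable.
def pvFindIdxA : List Int → Int → Int → Int
  | [], _, i => i - 1
  | x :: xs, v, i => if x = v then i else pvFindIdxA xs v (i + 1)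

def weak_point (l : List (List Int)) : List Int :=
  let row_sums := l.map (fun x => x.sum)
  let col_sums := (pvTransposeA l).map (fun y => y.sum)
  let rmin := (PySem.List.min? row_sums (fun x => x)).getD 0
  let r := pvFindIdxA row_sums rmin 0
  let cmin := (PySem.List.min? col_sums (fun x => x)).getD 0
  let c := pvFindIdxA col_sums cmin 0
  [r, c]

-- ===== PORT B =====
-- Source B's colsum(j): running sum of row[j] over the rows; row[j]'s IndexError
-- (pyGetD's default) is excluded by Pre_.
def pvColSum (l : List (List Int)) (j : Int) : Int :=
  l.foldl (fun s row => s + PySem.List.pyGetD row j 0) 0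

-- Source B's row loop: online argmin over the remaining rows, i the running index.
def pvRowLoop : List (List Int) → Int → Int → Int → Int × Int
  | [], _, r, best => (r, best)
  | row :: rest, i, r, best =>
    let s := row.sum
    if s < best then pvRowLoop rest (i + 1) i s else pvRowLoop rest (i + 1) r best

-- Source B's column loop: online argmin over the column indices j in range(1, cols).
def pvColLoop (l : List (List Int)) : List Int → Int → Int → Int × Int
  | [], c, best => (c, best)
  | j :: js, c, best =>
    let s := pvColSum l j
    if s < best then pvColLoop l js j s else pvColLoop l js c best

def weak_point_alt (l : List (List Int)) : List Int :=
  let cols : Int := ((PySem.List.pyGet? l 0).getD []).length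
  let rp := pvRowLoop (l.drop 1) 1 0 ((PySem.List.pyGet? l 0).getD []).sum
  let cp := pvColLoop l (PySem.List.pyRange 1 cols 1) 0 (pvColSum l 0)
  [rp.1, cp.1]

-- ===== PRECONDITION & SPEC =====
-- A raises outside this set: IndexError on an empty matrix and when some row is
-- shorter than the first row (transpose reads l[r][c] for every c < len(l[0])),
-- ValueError (min of empty col_sums) when the first row is empty. Rows longer than
-- the first row are admitted: both A and B ignore their extra entries.
def Pre_weak_point (l : List (List Int)) : Prop :=
  l ≠ [] ∧ l.headD [] ≠ [] ∧ ∀ row ∈ l, (l.headD []).length ≤ row.length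
instance (l : List (List Int)) : Decidable (Pre_weak_point l) := by unfold Pre_weak_point; infer_instance

def pvWitness_weak_point : List (List Int) := [[1, 2], [3, 0]]

def Spec_weak_point (l : List (List Int)) (out : List Int) : Prop := out = weak_point_alt l
instance (l : List (List Int)) (out : List Int) : Decidable (Spec_weak_point l out) := by unfold Spec_weak_point; infer_instance

-- ===== CLAIM (what is proved, stated in full; the proofs are below) =====
def Claim_equal_weak_point : Prop := ∀ (l : List (List Int)), Dom_weak_point l → Pre_weak_point l → Spec_weak_point l (weak_point l)

-- ===== LEMMAS AND PROOFS =====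

-- Both of B's loops are instances of this online argmin scan over a value list.
def pvScan : List Int → Int → Int → Int → Int × Int
  | [], _, r, best => (r, best)
  | v :: vs, k, r, best =>
    if v < best then pvScan vs (k + 1) k v else pvScan vs (k + 1) r best

theorem pvRowLoop_eq_scan (rest : List (List Int)) (i r best : Int) :
    pvRowLoop rest i r best = pvScan (rest.map (fun x => x.sum)) i r best := by
  induction rest generalizing i r best with
  | nil => rfl
  | cons row t ih => simp only [pvRowLoop, pvScan, List.map_cons]; split_ifs <;> exact ih ..

theorem pvColLoop_eq_scan (l : List (List Int)) (n : Nat) :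
    ∀ (a c best : Int), pvColLoop l (PySem.List.pyRange a (a + n) 1) c best
      = pvScan ((PySem.List.pyRange a (a + n) 1).map (pvColSum l)) a c best := by
  induction n with
  | zero => intro a c best; rw [PySem.List.pyRange_one_eq_nil (by omega)]; rfl
  | succ m ih =>
    intro a c best
    rw [PySem.List.pyRange_one_cons (by omega : a < a + ((m : Nat) + 1 : Nat))]
    have h1 : (a + 1) + (m : Int) = a + ((m : Nat) + 1 : Nat) := by push_cast; ring
    simp only [pvColLoop, pvScan, List.map_cons]
    split_ifs <;> rw [← h1, ih]

-- The online scan returns the first index of the minimum of best :: vs (strict '<'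
-- keeps the earlier index on ties), with the candidate slot r for the head.
theorem pvScan_spec (vs : List Int) : ∀ (k r best : Int),
    pvScan vs k r best
      = (if best = vs.foldl min best then r
         else k + (((PySem.List.index? vs (vs.foldl min best)).getD 0 : Nat) : Int),
         vs.foldl min best) := by
  induction vs with
  | nil => intro k r best; simp [pvScan]
  | cons v vs ih =>
    intro k r best
    have hle := (PySem.List.foldl_min_le vs (min best v)).1
    by_cases hv : v < best
    · have hmin : min best v = v := by omega
      simp only [pvScan, if_pos hv, List.foldl_cons, hmin, ih]
      have hne : ¬ best = vs.foldl min v := by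
        have : vs.foldl min v ≤ v := by simpa [hmin] using hle
        intro h; omega
      rw [if_neg hne]
      by_cases hvm : v = vs.foldl min v
      · rw [if_pos hvm, ← hvm, PySem.List.index?_cons_self]; simp
      · rw [if_neg hvm, PySem.List.index?_cons_of_ne vs (fun h => hvm h)]
        rcases PySem.List.foldl_min_mem vs v with h | h
        · exact absurd h.symm hvm
        · obtain ⟨j, hj⟩ := Option.isSome_iff_exists.mp
            ((PySem.List.index?_isSome_iff vs _).mpr h)
          rw [hj]; simp; ring
    · have hmin : min best v = best := by omega
      simp only [pvScan, if_neg hv, List.foldl_cons, hmin, ih]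
      by_cases hb : best = vs.foldl min best
      · rw [if_pos hb, if_pos hb]
      · rw [if_neg hb, if_neg hb]
        have hvm : ¬ v = vs.foldl min best := by
          have : vs.foldl min best ≤ best := by simpa [hmin] using hle
          intro h; omega
        rw [PySem.List.index?_cons_of_ne vs (fun h => hvm h)]
        rcases PySem.List.foldl_min_mem vs best with h | h
        · exact absurd h.symm hb
        · obtain ⟨j, hj⟩ := Option.isSome_iff_exists.mp
            ((PySem.List.index?_isSome_iff vs _).mpr h)
          rw [hj]; simp; ring

-- The scan started at (0, x) over vs finds Python's xs.index(min(xs)) for xs = x :: vs.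
theorem pvScan_head (x : Int) (vs : List Int) :
    (pvScan vs 1 0 x).1
      = (((PySem.List.index? (x :: vs) (vs.foldl min x)).getD 0 : Nat) : Int) := by
  rw [pvScan_spec]
  by_cases hx : x = vs.foldl min x
  · rw [if_pos hx, ← hx, PySem.List.index?_cons_self]; simp
  · rw [if_neg hx, PySem.List.index?_cons_of_ne vs (fun h => hx h)]
    rcases PySem.List.foldl_min_mem vs x with h | h
    · exact absurd h.symm hx
    · obtain ⟨j, hj⟩ := Option.isSome_iff_exists.mp
        ((PySem.List.index?_isSome_iff vs _).mpr h)
      rw [hj]; simp; ring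

-- A's break loop equals xs.index(v) when v occurs in xs.
theorem pvFindIdxA_eq_index (xs : List Int) (v : Int) (hv : v ∈ xs) (i : Int) :
    pvFindIdxA xs v i = i + ((PySem.List.index? xs v).getD 0 : Nat) := by
  induction xs generalizing i with
  | nil => cases hv
  | cons x t ih =>
    by_cases hx : x = v
    · subst hx
      rw [PySem.List.index?_cons_self]
      simp [pvFindIdxA]
    · have hvt : v ∈ t := by cases hv with
        | head => exact absurd rfl hx
        | tail _ h => exact h
      obtain ⟨k, hk⟩ := Option.isSome_iff_exists.mp ((PySem.List.index?_isSome_iff t v).mpr hvt)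
      rw [pvFindIdxA]
      simp only [if_neg hx]
      rw [ih hvt, PySem.List.index?_cons_of_ne t hx, hk]
      simp
      ring

-- A's whole argmin stage on a nonempty list, in the scan's foldl-min vocabulary.
theorem pvFindIdxA_min (x : Int) (vs : List Int) :
    pvFindIdxA (x :: vs) ((PySem.List.min? (x :: vs) (fun y => y)).getD 0) 0
      = (((PySem.List.index? (x :: vs) (vs.foldl min x)).getD 0 : Nat) : Int) := by
  rw [PySem.List.min?_id_cons]
  have hm : vs.foldl min x ∈ x :: vs := by
    rcases PySem.List.foldl_min_mem vs x with h | h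
    · rw [h]; exact List.mem_cons_self
    · exact List.mem_cons_of_mem _ h
  simpa using pvFindIdxA_eq_index (x :: vs) (vs.foldl min x) hm 0

-- Source B's colsum(j) is the j-th column sum when every row reaches column j.
theorem pvColSum_eq (l : List (List Int)) (j : Nat) :
    pvColSum l (j : Int) = (l.map (fun row => row.getD j 0)).sum := by
  unfold pvColSum
  rw [← List.foldl_map (f := fun row => PySem.List.pyGetD row (j : Int) 0) (g := (· + ·)),
      ← List.sum_eq_foldl]
  congr 1
  apply List.map_congr_left
  intro row _
  rw [PySem.List.pyGetD_natCast]

-- A's transposed column sums, characterised pointwise.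
theorem pvColA (h : List Int) (t : List (List Int)) :
    (pvTransposeA (h :: t)).map (fun y => y.sum)
    = (List.range h.length).map (fun j => (((h :: t)).map (fun row => row.getD j 0)).sum) := by
  unfold pvTransposeA
  simp only [PySem.List.pyGet?_zero_cons, Option.getD_some]
  rw [PySem.List.pyRange_one 0 ((h.length : Int))]
  simp only [sub_zero, Int.toNat_natCast, zero_add, List.map_map]
  apply List.map_congr_left
  intro j hj
  simp only [Function.comp_apply]
  congr 1
  have : (PySem.List.pyRange 0 ((h :: t).length : Int) 1).map
      (fun r => (PySem.List.pyGet? ((PySem.List.pyGet? (h :: t) r).getD []) (j : Int)).getD 0)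
    = ((PySem.List.pyRange 0 ((h :: t).length : Int) 1).map
      (fun r => PySem.List.pyGetD (h :: t) r [])).map (fun row => (PySem.List.pyGet? row (j : Int)).getD 0) := by
    rw [List.map_map]
    rfl
  rw [this, PySem.List.map_pyGetD_pyRange_zero']
  simp [List.getD_eq_getElem?_getD]

theorem pvMain (h : List Int) (t : List (List Int)) (hh : h ≠ [])
    (hlen : ∀ row ∈ h :: t, h.length ≤ row.length) :
    weak_point (h :: t) = weak_point_alt (h :: t) := by
  obtain ⟨n, hn⟩ : ∃ n, h.length = n + 1 := by
    cases h with
    | nil => exact absurd rfl hh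
    | cons a b => exact ⟨b.length, rfl⟩
  have hcolsum : ∀ j : Nat,
      pvColSum (h :: t) (j : Int) = (((h :: t)).map (fun row => row.getD j 0)).sum :=
    fun j => pvColSum_eq _ j
  -- A's column-sum list, split into head and tail, in B's colsum vocabulary
  have hsplit :
      (List.range h.length).map (fun j => (((h :: t)).map (fun row => row.getD j 0)).sum)
      = pvColSum (h :: t) 0
        :: (PySem.List.pyRange 1 (h.length : Int) 1).map (pvColSum (h :: t)) := by
    rw [hn, List.range_succ_eq_map, List.map_cons, List.map_map]
    congr 1
    · rw [← hcolsum 0]; rfl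
    · rw [PySem.List.pyRange_one 1 ((n + 1 : Nat) : Int)]
      have : ((n + 1 : Nat) : Int) - 1 = (n : Int) := by push_cast; ring
      rw [this, Int.toNat_natCast, List.map_map]
      apply List.map_congr_left
      intro k hk
      rw [List.mem_range] at hk
      simp only [Function.comp_apply]
      have h1 : ((1 : Int) + (k : Int)) = ((k + 1 : Nat) : Int) := by push_cast; ring
      rw [h1, hcolsum (k + 1)]
  have hc : (h.length : Int) = 1 + ((h.length - 1 : Nat) : Int) := by omega
  unfold weak_point weak_point_alt
  simp only [pvColA, List.drop_one, List.tail_cons,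
    PySem.List.pyGet?_zero_cons, Option.getD_some]
  rw [hsplit]
  simp only [List.map_cons]
  rw [pvFindIdxA_min, pvFindIdxA_min, pvRowLoop_eq_scan, pvScan_head]
  rw [hc, pvColLoop_eq_scan (h :: t) (h.length - 1) 1 0 (pvColSum (h :: t) 0), pvScan_head]

-- ===== VERDICT (by name: the statement is the Claim_ definition above) =====
theorem weak_point_spec : Claim_equal_weak_point := by
  intro l _ hpre
  obtain ⟨hne, hh, hlen⟩ := hpre
  cases l with
  | nil => exact absurd rfl hne
  | cons h t => exact pvMain h t hh hlen
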